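-- pv_equiv track=rewrite | github.com/cctbx/cctbx_project | qttbx/viewers/gui/controller/restraint_edits/tables.py | transform_to_dict
-- ===== SOURCE A (Python) =====
-- def transform_to_dict(nested_list,prefix="Label"):
--   # Transform a list of lists to a dictionary of lists
--   # Determine the number of sublists
--     num_sublists = len(nested_list)
--     # Determine the length of each sublist
--     sublist_length = len(nested_list[0])
--
--     # Initialize an empty dictionary to store the results
--     result_dict = {}
--
--     # Iterate over the indices of the sublists
--     for i in range(sublist_length):
--       # Create a label for each index
--       label = f'{prefix}_{i+1}'
--       # Gather all elements at index i from each sublist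
--       result_dict[label] = [nested_list[j][i] for j in range(num_sublists)]
--
--     return result_dict
-- ===== SOURCE B (Python) =====
-- def transform_to_dict(nested_list, prefix="Label"):
--     # Row-major transpose: distribute each row's elements into per-index columns,
--     # then label the columns once at the end.
--     sublist_length = len(nested_list[0])
--     columns = [[] for _ in range(sublist_length)]
--     for row in nested_list:
--         columns = [col + [row[i]] for i, col in enumerate(columns)]
--     return {f"{prefix}_{i+1}": col for i, col in enumerate(columns)}
-- ===== Notes on version B (the rewrite author's own statement) =====
-- stated objective: alternative
-- what changed: A builds each labelled column by re-scanning the whole nested list per column index (column-major, nested index loops); B makes a single row-major pass that distributes each row's elements into pre-built columns via enumerate, then labels the columns in one final dict comprehension.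
import Mathlib
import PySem

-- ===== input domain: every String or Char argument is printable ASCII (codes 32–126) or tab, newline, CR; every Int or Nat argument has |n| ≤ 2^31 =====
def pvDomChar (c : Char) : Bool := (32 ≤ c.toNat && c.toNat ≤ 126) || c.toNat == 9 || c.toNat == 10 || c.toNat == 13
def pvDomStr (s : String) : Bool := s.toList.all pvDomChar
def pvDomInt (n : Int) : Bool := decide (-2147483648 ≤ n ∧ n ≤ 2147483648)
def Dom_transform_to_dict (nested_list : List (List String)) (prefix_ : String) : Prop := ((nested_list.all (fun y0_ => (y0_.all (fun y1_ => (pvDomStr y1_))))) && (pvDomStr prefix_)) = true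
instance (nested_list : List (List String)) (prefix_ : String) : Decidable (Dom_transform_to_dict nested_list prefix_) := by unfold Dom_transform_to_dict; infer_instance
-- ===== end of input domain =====

-- B replaces A's column-major rescan of the whole nested list per column index by one
-- row-major pass distributing each row into pre-built columns (alternative decomposition).

-- f'{prefix}_{i+1}' (both Pythons build the same f-string)
def pvLabel (prefix_ : String) (i : Int) : String :=
  prefix_ ++ "_" ++ PySem.Int.toStr (i + 1)

-- ===== PORT A =====
def transform_to_dict (nested_list : List (List String)) (prefix_ : String) : List (String × List String) :=
  let num_sublists : Int := nested_list.length
  let sublist_length : Int := (PySem.List.pyGetD nested_list 0 []).length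
  ((PySem.List.pyRange 0 sublist_length 1).foldl
    (fun d i =>
      d.insert (pvLabel prefix_ i)
        ((PySem.List.pyRange 0 num_sublists 1).map
          (fun j => PySem.List.pyGetD (PySem.List.pyGetD nested_list j []) i "")))
    PySem.Dict.empty).items

-- ===== PORT B =====
def transform_to_dict_alt (nested_list : List (List String)) (prefix_ : String) : List (String × List String) :=
  let sublist_length : Int := (PySem.List.pyGetD nested_list 0 []).length
  let columns := nested_list.foldl
    (fun cols row =>
      (PySem.List.enumerate cols 0).map (fun p => p.2 ++ [PySem.List.pyGetD row p.1 ""]))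
    ((PySem.List.pyRange 0 sublist_length 1).map (fun _ => ([] : List String)))
  ((PySem.List.enumerate columns 0).foldl
    (fun d p => d.insert (pvLabel prefix_ p.1) p.2)
    PySem.Dict.empty).items

-- ===== PRECONDITION & SPEC =====
-- Pre_ excludes exactly the inputs where Python A raises IndexError: the empty list
-- (nested_list[0]) and lists with some row shorter than the first row (nested_list[j][i]).
def Pre_transform_to_dict (nested_list : List (List String)) (prefix_ : String) : Prop :=
  nested_list ≠ [] ∧ ∀ row ∈ nested_list, (nested_list.headD []).length ≤ row.length
instance (nested_list : List (List String)) (prefix_ : String) : Decidable (Pre_transform_to_dict nested_list prefix_) := by unfold Pre_transform_to_dict; infer_instance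

def pvWitness_transform_to_dict : List (List String) × String :=
  ([["a", "b"], ["c", "d"], ["e", "f"]], "X")

def Spec_transform_to_dict (nested_list : List (List String)) (prefix_ : String) (out : List (String × List String)) : Prop := out = transform_to_dict_alt nested_list prefix_
instance (nested_list : List (List String)) (prefix_ : String) (out : List (String × List String)) : Decidable (Spec_transform_to_dict nested_list prefix_ out) := by unfold Spec_transform_to_dict; infer_instance

-- ===== CLAIM (what is proved, stated in full; the proofs are below) =====
def Claim_equal_transform_to_dict : Prop := ∀ (nested_list : List (List String)) (prefix_ : String), Dom_transform_to_dict nested_list prefix_ → Pre_transform_to_dict nested_list prefix_ → Spec_transform_to_dict nested_list prefix_ (transform_to_dict nested_list prefix_)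

-- ===== LEMMAS AND PROOFS =====

-- B's per-row comprehension, on columns of shape (pyRange 0 s 1).map F, appends row[i] to column i.
theorem pv_step_map (row : List String) (s : Int) (F : Int → List String) :
    (PySem.List.enumerate ((PySem.List.pyRange 0 s 1).map F) 0).map
        (fun p => p.2 ++ [PySem.List.pyGetD row p.1 ""])
      = (PySem.List.pyRange 0 s 1).map (fun i => F i ++ [PySem.List.pyGetD row i ""]) := by
  rw [PySem.List.enumerate_eq_map_pyRange ((PySem.List.pyRange 0 s 1).map F) ([] : List String)]
  rw [List.map_map]
  have hlen : PySem.List.len ((PySem.List.pyRange 0 s 1).map F) = (s.toNat : Int) := by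
    simp [PySem.List.len_eq, PySem.List.length_pyRange_one]
  rw [hlen]
  have hr : PySem.List.pyRange 0 ((s.toNat : Int)) 1 = PySem.List.pyRange 0 s 1 := by
    simp only [PySem.List.pyRange_one, Int.sub_zero]
    have h2 : ((s.toNat : Int)).toNat = s.toNat := by omega
    rw [h2]
  rw [hr]
  apply List.map_congr_left
  intro j hj
  rw [PySem.List.mem_pyRange_one] at hj
  simp only [Function.comp]
  rw [PySem.List.pyGetD_map_pyRange_of_nonneg F s j _ hj.1 hj.2]

-- B's row fold computes every column in closed form.
theorem pv_cols_fold (rows : List (List String)) (s : Int) (F : Int → List String) :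
    rows.foldl
      (fun cols row =>
        (PySem.List.enumerate cols 0).map (fun p => p.2 ++ [PySem.List.pyGetD row p.1 ""]))
      ((PySem.List.pyRange 0 s 1).map F)
      = (PySem.List.pyRange 0 s 1).map
          (fun i => F i ++ rows.map (fun row => PySem.List.pyGetD row i "")) := by
  induction rows generalizing F with
  | nil => simp
  | cons r rs ih =>
      rw [List.foldl_cons, pv_step_map r s F, ih]
      simp [List.append_assoc]

-- A's inner comprehension over j in range(len(nested_list)) is the column at index i.
theorem pv_colA (nested : List (List String)) (i : Int) :
    (PySem.List.pyRange 0 (nested.length : Int) 1).map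
        (fun j => PySem.List.pyGetD (PySem.List.pyGetD nested j []) i "")
      = nested.map (fun row => PySem.List.pyGetD row i "") := by
  have h : (fun j => PySem.List.pyGetD (PySem.List.pyGetD nested j []) i "")
      = (fun row => PySem.List.pyGetD row i "") ∘ (fun j => PySem.List.pyGetD nested j []) := rfl
  rw [h, ← List.map_map, PySem.List.map_pyGetD_pyRange_zero']

theorem pv_main (nested_list : List (List String)) (prefix_ : String) :
    transform_to_dict nested_list prefix_ = transform_to_dict_alt nested_list prefix_ := by
  unfold transform_to_dict transform_to_dict_alt
  dsimp only
  set s : Int := ((PySem.List.pyGetD nested_list 0 []).length : Int) with hs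
  rw [pv_cols_fold nested_list s (fun _ => ([] : List String))]
  simp only [List.nil_append]
  set cols := (PySem.List.pyRange 0 s 1).map
      (fun i => nested_list.map (fun row => PySem.List.pyGetD row i "")) with hcols
  rw [PySem.List.enumerate_eq_map_pyRange cols ([] : List String)]
  rw [List.foldl_map]
  have hlen : PySem.List.len cols = (s.toNat : Int) := by
    simp [hcols, PySem.List.len_eq, PySem.List.length_pyRange_one]
  rw [hlen]
  have hr : PySem.List.pyRange 0 ((s.toNat : Int)) 1 = PySem.List.pyRange 0 s 1 := by
    simp only [PySem.List.pyRange_one, Int.sub_zero]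
    have h2 : ((s.toNat : Int)).toNat = s.toNat := by omega
    rw [h2]
  rw [hr]
  congr 1
  apply PySem.List.foldl_congr_mem'
  intro i hi d
  rw [PySem.List.mem_pyRange_one] at hi
  dsimp only
  rw [hcols, PySem.List.pyGetD_map_pyRange_of_nonneg _ s i _ hi.1 hi.2, pv_colA nested_list i]

-- ===== VERDICT (by name: the statement is the Claim_ definition above) =====
theorem transform_to_dict_spec : Claim_equal_transform_to_dict := by
  intro nested_list prefix_ _ _
  unfold Spec_transform_to_dict
  exact pv_main nested_list prefix_
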